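-- pv_equiv track=rewrite | github.com/codezone2022/acsl | 2019-20/contest2/prog/junior/string_difference.py | remove_double_consonants
-- ===== SOURCE A (Python) =====
-- def is_vowel(c):
-- 	if c == 'A' or c == 'E' or c == 'I' or c == 'O' or c == 'U':
-- 		return True
-- 	return False
--
-- def remove_double_consonants(s):
-- 	res = ''
-- 	for c in s:
-- 		if len(res) == 0:
-- 			res += c
-- 			continue
-- 		p = res[len(res)-1]
-- 		if not is_vowel(p) and not is_vowel(c) and p == c:
-- 			continue
-- 		res += c
-- 	return res
-- ===== SOURCE B (Python) =====
-- def is_vowel(c):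
-- 	if c == 'A' or c == 'E' or c == 'I' or c == 'O' or c == 'U':
-- 		return True
-- 	return False
--
-- def remove_double_consonants(s):
-- 	pieces = []
-- 	i = 0
-- 	n = len(s)
-- 	while i < n:
-- 		j = i
-- 		while j < n and s[j] == s[i]:
-- 			j += 1
-- 		c = s[i]
-- 		pieces.append(c * (j - i) if is_vowel(c) else c)
-- 		i = j
-- 	return ''.join(pieces)
-- ===== Notes on version B (the rewrite author's own statement) =====
-- stated objective: alternative
-- what changed: B splits the string into maximal runs of equal characters (a run-length scan) and emits each whole run for vowels but a single copy for consonant runs, instead of A's per-character loop that compares each char against the last char of the growing result; both are one pass.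
import Mathlib
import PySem

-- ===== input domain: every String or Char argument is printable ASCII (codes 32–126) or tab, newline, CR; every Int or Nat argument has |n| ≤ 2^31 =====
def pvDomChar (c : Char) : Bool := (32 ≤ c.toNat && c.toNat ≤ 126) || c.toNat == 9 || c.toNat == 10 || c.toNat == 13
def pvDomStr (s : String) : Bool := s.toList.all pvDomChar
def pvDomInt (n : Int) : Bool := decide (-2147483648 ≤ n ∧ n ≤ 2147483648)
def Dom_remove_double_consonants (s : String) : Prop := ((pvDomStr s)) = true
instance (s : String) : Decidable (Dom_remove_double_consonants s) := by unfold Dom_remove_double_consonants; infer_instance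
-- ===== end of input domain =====

-- B replaces A's per-character loop (compare with last output char) by a run-length
-- scan over maximal runs of equal characters: one copy for a consonant run, the whole
-- run for a vowel run (objective: alternative decomposition).

-- ===== PORT A =====
def is_vowel (c : Char) : Bool :=
  if c == 'A' || c == 'E' || c == 'I' || c == 'O' || c == 'U' then true else false

-- one step of A's loop body (res is the string built so far, as a char list)
def rdcStep (res : List Char) (c : Char) : List Char :=
  if res.length = 0 then res ++ [c]
  else
    let p := res.getD (res.length - 1) ' '
    if !is_vowel p && !is_vowel c && p == c then res
    else res ++ [c]

def remove_double_consonants (s : String) : String :=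
  String.mk (s.toList.foldl rdcStep [])

-- ===== PORT B =====
-- maximal runs of equal consecutive characters, as (char, run length)
def rdcRuns : List Char → List (Char × Nat)
  | [] => []
  | c :: rest =>
      (c, 1 + (rest.takeWhile (· == c)).length) :: rdcRuns (rest.dropWhile (· == c))
termination_by l => l.length
decreasing_by
  simp only [List.length_cons]
  exact Nat.lt_succ_of_le (List.length_dropWhile_le _ _)

def remove_double_consonants_alt (s : String) : String :=
  String.mk ((rdcRuns s.toList).flatMap
    (fun g => if is_vowel g.1 then List.replicate g.2 g.1 else [g.1]))

-- ===== PRECONDITION & SPEC =====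
def Spec_remove_double_consonants (s : String) (out : String) : Prop := out = remove_double_consonants_alt s
instance (s : String) (out : String) : Decidable (Spec_remove_double_consonants s out) := by unfold Spec_remove_double_consonants; infer_instance

-- ===== CLAIM (what is proved, stated in full; the proofs are below) =====
def Claim_equal_remove_double_consonants : Prop := ∀ (s : String), Dom_remove_double_consonants s → Spec_remove_double_consonants s (remove_double_consonants s)

-- ===== LEMMAS AND PROOFS =====

-- pure tail function: what A appends after the output already ends in char p
def fA (p : Char) : List Char → List Char
  | [] => []
  | c :: cs =>
      if !is_vowel p && !is_vowel c && p == c then fA p cs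
      else c :: fA c cs

lemma rdc_loop (cs : List Char) : ∀ (init : List Char) (a : Char),
    List.foldl rdcStep (init ++ [a]) cs = init ++ [a] ++ fA a cs := by
  induction cs with
  | nil => intro init a; simp [fA]
  | cons c cs ih =>
      intro init a
      have hlen : (init ++ [a]).length ≠ 0 := by simp
      have hgetD : (init ++ [a]).getD ((init ++ [a]).length - 1) ' ' = a := by
        simp [List.getD]
      by_cases h : (!is_vowel a && !is_vowel c && a == c) = true
      · simp only [List.foldl_cons, rdcStep, if_neg hlen, hgetD, h, if_pos, fA]
        exact ih init a
      · simp only [List.foldl_cons, rdcStep, if_neg hlen, hgetD, fA]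
        rw [if_neg h, if_neg h]
        have := ih (init ++ [a]) c
        simpa using this

lemma fA_skip_run (c : Char) (hc : is_vowel c = false) :
    ∀ (t r : List Char), (∀ x ∈ t, x = c) → fA c (t ++ r) = fA c r := by
  intro t
  induction t with
  | nil => intro r _; rfl
  | cons x t ih =>
      intro r hall
      have hx : x = c := hall x (by simp)
      subst hx
      simp only [List.cons_append, fA, hc]
      rw [if_pos (by simp)]
      exact ih r (fun y hy => hall y (by simp [hy]))

lemma fA_emit_run (c : Char) (hc : is_vowel c = true) :
    ∀ (t r : List Char), (∀ x ∈ t, x = c) → fA c (t ++ r) = t ++ fA c r := by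
  intro t
  induction t with
  | nil => intro r _; rfl
  | cons x t ih =>
      intro r hall
      have hx : x = c := hall x (by simp)
      subst hx
      simp only [List.cons_append, fA]
      rw [if_neg (by simp [hc])]
      rw [ih r (fun y hy => hall y (by simp [hy]))]

lemma dropWhile_head_ne {p : Char → Bool} :
    ∀ (l : List Char) (a : Char) (t : List Char), l.dropWhile p = a :: t → p a = false := by
  intro l
  induction l with
  | nil => intro a t h; simp [List.dropWhile] at h
  | cons x l ih =>
      intro a t h
      by_cases hx : p x = true
      · rw [List.dropWhile_cons_of_pos hx] at h; exact ih a t h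
      · rw [List.dropWhile_cons_of_neg (by simpa using hx)] at h
        cases h; simpa using hx

-- main induction: A's head-plus-tail equals B's flattened runs
lemma rdc_main : ∀ (n : ℕ) (cs : List Char) (c : Char), cs.length ≤ n →
    c :: fA c cs = (rdcRuns (c :: cs)).flatMap
      (fun g => if is_vowel g.1 then List.replicate g.2 g.1 else [g.1]) := by
  intro n
  induction n with
  | zero =>
      intro cs c h
      have : cs = [] := List.eq_nil_of_length_eq_zero (Nat.le_zero.mp h)
      subst this
      by_cases hv : is_vowel c = true <;>
        simp [rdcRuns, fA, hv, List.replicate]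
  | succ n ih =>
      intro cs c h
      set t := cs.takeWhile (· == c) with ht
      set r := cs.dropWhile (· == c) with hr
      have hsplit : cs = t ++ r := (List.takeWhile_append_dropWhile).symm
      have hall : ∀ x ∈ t, x = c := by
        intro x hx
        have := List.mem_takeWhile_imp hx
        simpa using this
      have hrep : t = List.replicate t.length c := List.eq_replicate_of_mem hall
      -- fA c r equals the flatMap of the remaining runs
      have htail : fA c r = (rdcRuns r).flatMap
          (fun g => if is_vowel g.1 then List.replicate g.2 g.1 else [g.1]) := by
        cases hcase : r with
        | nil => simp [fA, rdcRuns]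
        | cons d r' =>
            have hd : (d == c) = false := dropWhile_head_ne cs d r' (hr.symm.trans hcase)
            have hcd : (c == d) = false := by
              have : d ≠ c := by simpa using hd
              exact beq_eq_false_iff_ne.mpr (Ne.symm this)
            have hlen : r'.length ≤ n := by
              have h1 : r.length ≤ cs.length := List.length_dropWhile_le _ _
              rw [hcase] at h1
              simp only [List.length_cons] at h1
              omega
            rw [fA, if_neg (by simp [hcd])]
            exact ih r' d hlen
      conv_lhs => rw [hsplit]
      rw [rdcRuns]
      simp only [List.flatMap_cons, ← ht, ← hr]
      by_cases hv : is_vowel c = true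
      · rw [fA_emit_run c hv t r hall, htail, if_pos hv, Nat.add_comm, List.replicate_succ,
          ← hrep]
        simp
      · have hv' : is_vowel c = false := by simpa using hv
        rw [fA_skip_run c hv' t r hall, htail, if_neg (by simp [hv'])]
        simp

-- ===== VERDICT (by name: the statement is the Claim_ definition above) =====
theorem remove_double_consonants_spec : Claim_equal_remove_double_consonants := by
  intro s _
  unfold Spec_remove_double_consonants remove_double_consonants remove_double_consonants_alt
  cases hl : s.toList with
  | nil => simp [rdcRuns]
  | cons c cs =>
      congr 1
      have h0 : rdcStep [] c = [] ++ [c] := by simp [rdcStep]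
      rw [List.foldl_cons, h0, rdc_loop cs [] c]
      simpa using rdc_main cs.length cs c le_rfl
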